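-- pv_equiv track=rewrite | github.com/juyeong525/CodingTest | 프로그래머스/2/76502. 괄호 회전하기/괄호 회전하기.py | solution
-- ===== SOURCE A (Python) =====
-- def solution(s):
--     index = 0
--     s.replace("[]", "")
--     for i in range(len(s)):
--         a = s
--         while True:
--             if "()" in a or "[]" in a or "{}" in a:
--                 a = a.replace("[]", "")
--                 a = a.replace("()", "")
--                 a = a.replace("{}", "")
--             else:
--                 if len(a) == 0:
--                     index += 1
--                 break
--         # if s.find("(") <= s.find(")") and s.count("(") == s.count(")") and s.find("[") <= s.find("]") and s.count("[") == s.count("]") and s.find("{") <= s.find("}") and s.count("{") == s.count("}"):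
--         #     index += 1
--         s = s[1:] + s[0]
--     return index
-- ===== SOURCE B (Python) =====
-- def _balanced(t):
--     # single left-to-right scan with an explicit stack
--     stack = []
--     for ch in t:
--         if ch == '(' or ch == '[' or ch == '{':
--             stack.append(ch)
--         elif ch == ')':
--             if stack and stack[-1] == '(':
--                 stack.pop()
--             else:
--                 return False
--         elif ch == ']':
--             if stack and stack[-1] == '[':
--                 stack.pop()
--             else:
--                 return False
--         elif ch == '}':
--             if stack and stack[-1] == '{':
--                 stack.pop()
--             else:
--                 return False
--         else:
--             return False
--     return not stack
--
--
-- def solution(s):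
--     return sum(1 for i in range(len(s)) if _balanced(s[i:] + s[:i]))
-- ===== Notes on version B (the rewrite author's own statement) =====
-- stated objective: faster
-- what changed: Each rotation is checked by a single left-to-right stack scan instead of repeatedly rebuilding the string with replace('[]','')/replace('()','')/replace('{}','') until no pair remains.
import Mathlib
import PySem

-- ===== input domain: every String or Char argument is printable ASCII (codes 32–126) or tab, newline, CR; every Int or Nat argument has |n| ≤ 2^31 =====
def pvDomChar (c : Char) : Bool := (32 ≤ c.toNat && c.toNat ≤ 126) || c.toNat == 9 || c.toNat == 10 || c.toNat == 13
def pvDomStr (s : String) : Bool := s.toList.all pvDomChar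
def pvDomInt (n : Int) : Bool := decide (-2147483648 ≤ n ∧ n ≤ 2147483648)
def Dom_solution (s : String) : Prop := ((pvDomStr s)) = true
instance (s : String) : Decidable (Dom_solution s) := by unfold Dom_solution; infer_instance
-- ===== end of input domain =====

-- B checks each rotation with one left-to-right stack scan instead of A's repeated replace("[]"/"()"/"{}") reduction.

-- ===== PORT A =====
-- Characterisation of Python's str.replace for a 2-char pattern and empty replacement
-- (left-to-right, non-overlapping); needed by reduceLoop's termination proof below, so it stays above the port.
def removePair (o c : Char) : List Char → List Char
  | [] => []
  | [a] => [a]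
  | a :: b :: t => if a = o ∧ b = c then removePair o c t else a :: removePair o c (b :: t)

theorem go_eq_removePair (o c : Char) : ∀ (fuel : Nat) (l acc : List Char), l.length ≤ fuel →
    PySem.Chars.replace.go [o, c] [] fuel l acc = acc.reverse ++ removePair o c l := by
  intro fuel
  induction fuel with
  | zero =>
    intro l acc h
    have : l = [] := List.eq_nil_of_length_eq_zero (Nat.le_zero.mp h)
    subst this
    simp [PySem.Chars.replace.go, removePair]
  | succ n ih =>
    intro l acc h
    match l with
    | [] => simp [PySem.Chars.replace.go, removePair]
    | [a] =>
      have hp : [o, c].isPrefixOf [a] = false := by simp [List.isPrefixOf]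
      rw [PySem.Chars.replace.go]
      simp only [hp]
      simp only [Bool.false_eq_true, if_false]
      rw [ih [] (a :: acc) (by simp)]
      simp [removePair]
    | a :: b :: t =>
      by_cases hab : a = o ∧ b = c
      · obtain ⟨ha, hb⟩ := hab
        subst ha; subst hb
        have hp : [a, b].isPrefixOf (a :: b :: t) = true := by simp [List.isPrefixOf]
        rw [PySem.Chars.replace.go]
        simp only [hp, if_true]
        have : List.drop [a, b].length (a :: b :: t) = t := by simp
        rw [this]
        rw [ih t (List.reverse [] ++ acc) (by simp at h ⊢; omega)]
        simp [removePair]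
      · have hp : [o, c].isPrefixOf (a :: b :: t) = false := by
          simp [List.isPrefixOf]
          intro h1 h2; exact absurd ⟨h1.symm, h2.symm⟩ hab
        rw [PySem.Chars.replace.go]
        simp only [hp, Bool.false_eq_true, if_false]
        rw [ih (b :: t) (a :: acc) (by simp at h ⊢; omega)]
        simp [removePair, hab]

theorem replace_eq_removePair (o c : Char) (l : List Char) :
    PySem.Chars.replace l [o, c] [] = removePair o c l := by
  rw [PySem.Chars.replace]
  simp only [List.isEmpty_cons, Bool.false_eq_true, if_false]
  rw [go_eq_removePair o c l.length l [] le_rfl]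
  simp

theorem length_removePair_le (o c : Char) (l : List Char) :
    (removePair o c l).length ≤ l.length := by
  fun_induction removePair o c l with
  | case1 => simp
  | case2 => simp
  | case3 a b t h ih => simp; omega
  | case4 a b t h ih => simpa using ih

theorem length_removePair_lt (o c : Char) (l : List Char) (h : [o, c] <:+: l) :
    (removePair o c l).length < l.length := by
  fun_induction removePair o c l with
  | case1 => simp at h
  | case2 a =>
    exfalso
    have := h.length_le; simp at this
  | case3 a b t hab ih =>
    have := length_removePair_le o c t
    simp; omega
  | case4 a b t hab ih =>
    have hbt : [o, c] <:+: b :: t := by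
      rcases (List.infix_cons_iff).mp h with hpre | hinf
      · exfalso
        rcases hpre with ⟨r, hr⟩
        simp at hr
        exact hab ⟨hr.1.symm ▸ rfl, by simp [hr.2.1]⟩
      · exact hinf
    have := ih hbt
    simpa using this

theorem removePair_lt_or_eq (o c : Char) (l : List Char) :
    (removePair o c l).length < l.length ∨ removePair o c l = l := by
  fun_induction removePair o c l with
  | case1 => right; rfl
  | case2 a => right; rfl
  | case3 a b t hab ih =>
    left
    have := length_removePair_le o c t
    simp; omega
  | case4 a b t hab ih =>
    rcases ih with hlt | heq
    · left; simp at hlt ⊢; omega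
    · right; rw [heq]

-- a = a.replace("[]","").replace("()","").replace("{}","")  (one pass of A's while-loop body)
def reduceStep (a : List Char) : List Char :=
  PySem.Chars.replace (PySem.Chars.replace (PySem.Chars.replace a ['[', ']'] []) ['(', ')'] []) ['{', '}'] []

theorem length_reduceStep_lt (a : List Char)
    (h : (PySem.Chars.isIn ['(', ')'] a || PySem.Chars.isIn ['[', ']'] a || PySem.Chars.isIn ['{', '}'] a) = true) :
    (reduceStep a).length < a.length := by
  unfold reduceStep
  rw [replace_eq_removePair, replace_eq_removePair, replace_eq_removePair]
  rcases removePair_lt_or_eq '[' ']' a with h1 | h1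
  · have h2 := length_removePair_le '(' ')' (removePair '[' ']' a)
    have h3 := length_removePair_le '{' '}' (removePair '(' ')' (removePair '[' ']' a))
    omega
  · rw [h1]
    rcases removePair_lt_or_eq '(' ')' a with h2 | h2
    · have h3 := length_removePair_le '{' '}' (removePair '(' ')' a)
      omega
    · rw [h2]
      rcases removePair_lt_or_eq '{' '}' a with h3 | h3
      · exact h3
      · simp only [Bool.or_eq_true, PySem.Chars.isIn_iff_infix] at h
        rcases h with (hin | hin) | hin
        · have := length_removePair_lt '(' ')' a hin; rw [h2] at this; omega
        · have := length_removePair_lt '[' ']' a hin; rw [h1] at this; omega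
        · exact length_removePair_lt '{' '}' a hin

-- A's inner while-loop
def reduceLoop (a : List Char) : List Char :=
  if h : (PySem.Chars.isIn ['(', ')'] a || PySem.Chars.isIn ['[', ']'] a || PySem.Chars.isIn ['{', '}'] a) = true then
    reduceLoop (reduceStep a)
  else a
  termination_by a.length
  decreasing_by exact length_reduceStep_lt a h

-- s = s[1:] + s[0]  (s[0] raises on the empty string; that branch is unreachable: the loop body only runs when len(s) ≥ 1)
def rot (t : List Char) : List Char :=
  match PySem.List.pyGet? t 0 with
  | some c => PySem.List.slice t (some 1) none ++ [c]
  | none => t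

-- the 'for i in range(len(s))' loop of A (the initial discarded `s.replace("[]","")` is a no-op)
def aLoop : Nat → List Char → Int → Int
  | 0, _, idx => idx
  | n + 1, t, idx => aLoop n (rot t) (if reduceLoop t = [] then idx + 1 else idx)

def solution (s : String) : Int :=
  aLoop s.toList.length s.toList 0

-- ===== PORT B =====
-- _balanced: one scan with an explicit stack (the stack is kept head-first)
def chk : List Char → List Char → Bool
  | st, [] => st.isEmpty
  | st, ch :: t =>
    if ch = '(' || ch = '[' || ch = '{' then chk (ch :: st) t
    else if ch = ')' then
      if st.head? = some '(' then chk st.tail t else false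
    else if ch = ']' then
      if st.head? = some '[' then chk st.tail t else false
    else if ch = '}' then
      if st.head? = some '{' then chk st.tail t else false
    else false

def solution_alt (s : String) : Int :=
  let t := s.toList
  ((List.range t.length).countP (fun i => chk [] (t.drop i ++ t.take i)) : Int)

-- ===== PRECONDITION & SPEC =====
def Spec_solution (s : String) (out : Int) : Prop := out = solution_alt s
instance (s : String) (out : Int) : Decidable (Spec_solution s out) := by unfold Spec_solution; infer_instance

-- ===== CLAIM (what is proved, stated in full; the proofs are below) =====
def Claim_equal_solution : Prop := ∀ (s : String), Dom_solution s → Spec_solution s (solution s)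

-- ===== LEMMAS AND PROOFS =====

def Nopair (r : List Char) : Prop :=
  ¬ ['(', ')'] <:+: r ∧ ¬ ['[', ']'] <:+: r ∧ ¬ ['{', '}'] <:+: r

theorem chk_cons_congr (a : Char) (st : List Char) (x y : List Char)
    (h : ∀ st', chk st' x = chk st' y) : chk st (a :: x) = chk st (a :: y) := by
  simp only [chk]
  split_ifs <;> first | exact h _ | rfl

theorem chk_removePair (o c : Char)
    (hoc : (o = '(' ∧ c = ')') ∨ (o = '[' ∧ c = ']') ∨ (o = '{' ∧ c = '}')) :
    ∀ (l st : List Char), chk st (removePair o c l) = chk st l := by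
  intro l
  fun_induction removePair o c l with
  | case1 => intro st; rfl
  | case2 a => intro st; rfl
  | case3 a b t hab ih =>
    intro st
    rw [ih st]
    obtain ⟨ha, hb⟩ := hab
    rcases hoc with ⟨h1, h2⟩ | ⟨h1, h2⟩ | ⟨h1, h2⟩ <;> subst ha hb h1 h2 <;> simp [chk]
  | case4 a b t hab ih =>
    intro st
    exact chk_cons_congr a st _ _ ih

theorem chk_all_brackets : ∀ (r st : List Char), chk st r = true →
    ∀ ch ∈ r, ch = '(' ∨ ch = ')' ∨ ch = '[' ∨ ch = ']' ∨ ch = '{' ∨ ch = '}' := by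
  intro r
  induction r with
  | nil => intro st h ch hch; simp at hch
  | cons c t ih =>
    intro st h ch hch
    simp only [chk] at h
    split_ifs at h with h1 h2 hs2 h3 hs3 h4 hs4
    all_goals rcases List.mem_cons.mp hch with rfl | hmem
    · simp only [Bool.or_eq_true, decide_eq_true_eq] at h1; tauto
    · exact ih _ h ch hmem
    · tauto
    · exact ih _ h ch hmem
    · tauto
    · exact ih _ h ch hmem
    · tauto
    · exact ih _ h ch hmem

theorem nopair_tail {c : Char} {t : List Char} (h : Nopair (c :: t)) : Nopair t :=
  ⟨fun hx => h.1 (List.infix_cons hx), fun hx => h.2.1 (List.infix_cons hx),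
   fun hx => h.2.2 (List.infix_cons hx)⟩

theorem chk_no_open : ∀ (r st : List Char), chk st r = true → Nopair r →
    ∀ ch ∈ r, ch ≠ '(' ∧ ch ≠ '[' ∧ ch ≠ '{' := by
  intro r
  induction r with
  | nil => intro st h hnp ch hch; simp at hch
  | cons c t ih =>
    intro st h hnp ch hch
    simp only [chk] at h
    split_ifs at h with h1 h2 hs2 h3 hs3 h4 hs4
    · -- c is an opening bracket: derive False
      exfalso
      simp only [Bool.or_eq_true, decide_eq_true_eq] at h1
      cases t with
      | nil => simp [chk] at h
      | cons b t' =>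
        have hbr := chk_all_brackets (b :: t') (c :: st) h b (List.mem_cons_self)
        have hno := ih (c :: st) h (nopair_tail hnp) b (List.mem_cons_self)
        have hb : b = ')' ∨ b = ']' ∨ b = '}' := by tauto
        rcases h1 with (rfl | rfl) | rfl <;> rcases hb with rfl | rfl | rfl <;>
          simp [chk] at h <;>
          first
            | exact hnp.1 (List.IsPrefix.isInfix ⟨t', rfl⟩)
            | exact hnp.2.1 (List.IsPrefix.isInfix ⟨t', rfl⟩)
            | exact hnp.2.2 (List.IsPrefix.isInfix ⟨t', rfl⟩)
    all_goals rcases List.mem_cons.mp hch with rfl | hmem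
    · subst h2; exact ⟨by decide, by decide, by decide⟩
    · exact ih _ h (nopair_tail hnp) ch hmem
    · subst h3; exact ⟨by decide, by decide, by decide⟩
    · exact ih _ h (nopair_tail hnp) ch hmem
    · subst h4; exact ⟨by decide, by decide, by decide⟩
    · exact ih _ h (nopair_tail hnp) ch hmem

theorem nopair_chk_nil (r : List Char) (hnp : Nopair r) (h : chk [] r = true) : r = [] := by
  cases r with
  | nil => rfl
  | cons c t =>
    exfalso
    have hbr := chk_all_brackets (c :: t) [] h c (List.mem_cons_self)
    have hno := chk_no_open (c :: t) [] h hnp c (List.mem_cons_self)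
    have hc : c = ')' ∨ c = ']' ∨ c = '}' := by tauto
    rcases hc with rfl | rfl | rfl <;> simp [chk] at h

theorem chk_reduceStep (a : List Char) (st : List Char) :
    chk st (reduceStep a) = chk st a := by
  unfold reduceStep
  rw [replace_eq_removePair, replace_eq_removePair, replace_eq_removePair]
  rw [chk_removePair '{' '}' (by tauto), chk_removePair '(' ')' (by tauto),
    chk_removePair '[' ']' (by tauto)]

theorem chk_reduceLoop (a : List Char) : chk [] (reduceLoop a) = chk [] a := by
  fun_induction reduceLoop a with
  | case1 a h ih => rw [ih, chk_reduceStep]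
  | case2 a h => rfl

theorem nopair_reduceLoop (a : List Char) : Nopair (reduceLoop a) := by
  fun_induction reduceLoop a with
  | case1 a h ih => exact ih
  | case2 a h =>
    simp only [Bool.or_eq_true, not_or, Bool.not_eq_true] at h
    obtain ⟨⟨ha, hb⟩, hc⟩ := h
    exact ⟨(PySem.Chars.isIn_eq_false_iff _ _).mp ha,
      (PySem.Chars.isIn_eq_false_iff _ _).mp hb,
      (PySem.Chars.isIn_eq_false_iff _ _).mp hc⟩

theorem reduceLoop_eq_nil_iff (a : List Char) : reduceLoop a = [] ↔ chk [] a = true := by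
  constructor
  · intro h
    rw [← chk_reduceLoop, h]
    rfl
  · intro h
    exact nopair_chk_nil _ (nopair_reduceLoop a) (by rw [chk_reduceLoop]; exact h)

theorem rot_drop_take (t : List Char) (j : Nat) (hj : j < t.length) :
    rot (t.drop j ++ t.take j) = t.drop (j + 1) ++ t.take (j + 1) := by
  have hform : t.drop j ++ t.take j = t[j] :: (t.drop (j + 1) ++ t.take j) := by
    rw [List.drop_eq_getElem_cons hj, List.cons_append]
  rw [hform]
  unfold rot
  have hget : PySem.List.pyGet? (t[j] :: (t.drop (j + 1) ++ t.take j)) 0 = some t[j] := by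
    have hlen : (0:Int) < ((t[j] :: (t.drop (j + 1) ++ t.take j)).length : Int) := by
      exact_mod_cast Nat.succ_pos _
    simp only [PySem.List.pyGet?, PySem.List.pyIdx?]
    rw [if_pos le_rfl, if_pos hlen]
    simp
  rw [hget]
  rw [PySem.List.slice_from _ (by norm_num)]
  rw [List.take_add_one, List.getElem?_eq_getElem hj]
  simp

theorem rot_iterate (t : List Char) (j : Nat) (hj : j ≤ t.length) :
    rot^[j] t = t.drop j ++ t.take j := by
  induction j with
  | zero => simp
  | succ n ih =>
    rw [Function.iterate_succ_apply', ih (by omega), rot_drop_take t n (by omega)]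

theorem aLoop_count : ∀ (n : Nat) (t : List Char) (idx : Int),
    aLoop n t idx = idx + ((List.range n).countP (fun j => decide (reduceLoop (rot^[j] t) = [])) : Int) := by
  intro n
  induction n with
  | zero => intro t idx; simp [aLoop]
  | succ n ih =>
    intro t idx
    rw [aLoop, ih]
    rw [List.range_succ_eq_map, List.countP_cons, List.countP_map]
    have hcomp : ((fun j => decide (reduceLoop (rot^[j] t) = [])) ∘ Nat.succ) =
        (fun j => decide (reduceLoop (rot^[j] (rot t)) = [])) := by
      funext j
      simp [Function.iterate_succ_apply]
    rw [hcomp]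
    simp only [Function.iterate_zero_apply]
    by_cases h : reduceLoop t = [] <;> simp [h] <;> omega

-- ===== VERDICT (by name: the statement is the Claim_ definition above) =====
theorem solution_spec : Claim_equal_solution := by
  intro s _
  unfold Spec_solution solution solution_alt
  rw [aLoop_count]
  have : ((List.range s.toList.length).countP (fun j => decide (reduceLoop (rot^[j] s.toList) = []))) =
      ((List.range s.toList.length).countP (fun i => chk [] (s.toList.drop i ++ s.toList.take i))) := by
    apply List.countP_congr
    intro j hj
    have hjlt : j < s.toList.length := List.mem_range.mp hj
    rw [rot_iterate _ _ (le_of_lt hjlt)]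
    simp [reduceLoop_eq_nil_iff]
  rw [this]
  ring
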